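-- pv_equiv track=rewrite | github.com/malav-spec/BinaryConverter | Octal.py | get_three
-- ===== SOURCE A (Python) =====
-- def get_three(number):
--     count = 0
--     i = 0
--     sum = 0
--
--     while count != 3:
--         rem = number % 10
--         sum = sum + pow(10, i) * (rem)
--         i += 1
--         number = number // 10
--         count += 1
--
--     return sum, number
-- ===== SOURCE B (Python) =====
-- def get_three(number):
--     # closed form: low three decimal digits and the remaining quotient
--     return number % 1000, number // 1000
-- ===== Notes on version B (the rewrite author's own statement) =====
-- stated objective: simpler
-- what changed: Replaced the digit-accumulating while-loop with the single closed-form expression (number % 1000, number // 1000), exact for all integers by Python's floor-division semantics.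
import Mathlib
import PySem

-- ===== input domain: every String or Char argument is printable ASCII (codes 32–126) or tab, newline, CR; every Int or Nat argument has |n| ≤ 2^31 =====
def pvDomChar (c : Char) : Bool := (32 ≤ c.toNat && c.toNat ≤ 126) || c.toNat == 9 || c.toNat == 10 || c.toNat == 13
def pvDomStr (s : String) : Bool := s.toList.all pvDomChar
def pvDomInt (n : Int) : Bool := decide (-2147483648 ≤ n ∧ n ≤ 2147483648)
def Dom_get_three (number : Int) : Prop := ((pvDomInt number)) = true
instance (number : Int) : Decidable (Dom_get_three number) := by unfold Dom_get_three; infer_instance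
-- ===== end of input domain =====

-- B replaces A's 3-iteration digit loop with the closed form (number % 1000, number // 1000); objective: simpler.


-- ===== PORT A =====
-- literal port of A's while-loop (count runs 0,1,2; pow(10,i) with i = 0,1,2)
-- fuel = 3 - count (the loop runs while count != 3, i.e. exactly 3 times)
def get_three_loop : Nat → Int → Int → Int → Int × Int
  | 0, _, sum, number => (sum, number)
  | fuel + 1, i, sum, number =>
    let rem := PySem.Int.mod number 10
    get_three_loop fuel (i + 1) (sum + 10 ^ i.toNat * rem) (PySem.Int.floordiv number 10)

def get_three (number : Int) : Int × Int :=
  get_three_loop 3 0 0 number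

-- ===== PORT B =====
-- B: one line in comparison to the accumulator loop of A
def get_three_alt (number : Int) : Int × Int :=
  (PySem.Int.mod number 1000, PySem.Int.floordiv number 1000)

-- ===== PRECONDITION & SPEC =====
def Spec_get_three (number : Int) (out : Int × Int) : Prop := out = get_three_alt number
instance (number : Int) (out : Int × Int) : Decidable (Spec_get_three number out) := by unfold Spec_get_three; infer_instance

-- ===== CLAIM (what is proved, stated in full; the proofs are below) =====
def Claim_equal_get_three : Prop := ∀ (number : Int), Dom_get_three number → Spec_get_three number (get_three number)

-- ===== LEMMAS AND PROOFS =====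

-- ===== VERDICT (by name: the statement is the Claim_ definition above) =====
theorem get_three_spec : Claim_equal_get_three := by
  intro number _
  unfold Spec_get_three
  show get_three_loop 3 0 0 number = get_three_alt number
  simp only [get_three_loop, get_three_alt,
    PySem.Int.mod_eq_emod_of_pos (show (0:Int) < 10 by norm_num),
    PySem.Int.mod_eq_emod_of_pos (show (0:Int) < 1000 by norm_num),
    PySem.Int.floordiv_eq_ediv_of_pos (show (0:Int) < 10 by norm_num),
    PySem.Int.floordiv_eq_ediv_of_pos (show (0:Int) < 1000 by norm_num)]
  simp only [show ((0:Int)).toNat = 0 from rfl, show ((0:Int)+1).toNat = 1 from rfl,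
    show ((0:Int)+1+1).toNat = 2 from rfl]
  norm_num
  constructor <;> omega
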